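-- pv_equiv track=rewrite | github.com/brianmkimmel/AOC2021 | 10/day10.py | score_incomplete
-- ===== SOURCE A (Python) =====
-- def score_incomplete(line: list[str]) -> int:
--   scores = {'(':1, '[':2, '{':3, '<':4}
--   total_score = 0
--   for c in reversed(range(len(line))):
--     score = scores[line[c]]
--     total_score = total_score * 5
--     total_score += score
--   return total_score
-- ===== SOURCE B (Python) =====
-- def score_incomplete(line: list[str]) -> int:
--   scores = {'(':1, '[':2, '{':3, '<':4}
--   return sum(scores[c] * 5**i for i, c in enumerate(line))
-- ===== Notes on version B (the rewrite author's own statement) =====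
-- stated objective: idiomatic
-- what changed: Replaces the reversed-index Horner accumulation with a direct power-weighted sum: each character at forward index i contributes scores[c] * 5**i, summed in one forward enumerate pass with no running accumulator.
import Mathlib
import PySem

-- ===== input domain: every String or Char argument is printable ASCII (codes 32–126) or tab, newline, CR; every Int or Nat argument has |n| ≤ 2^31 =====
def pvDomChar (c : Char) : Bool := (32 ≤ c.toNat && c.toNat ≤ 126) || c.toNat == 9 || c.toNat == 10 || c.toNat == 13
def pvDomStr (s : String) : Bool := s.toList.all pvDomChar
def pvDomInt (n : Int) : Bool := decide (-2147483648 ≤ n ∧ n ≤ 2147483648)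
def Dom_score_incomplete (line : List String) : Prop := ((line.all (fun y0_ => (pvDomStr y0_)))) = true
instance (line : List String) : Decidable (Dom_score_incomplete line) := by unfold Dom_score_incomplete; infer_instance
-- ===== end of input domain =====

-- B replaces A's reversed-index Horner accumulation by the direct power-weighted sum Σ scores[c]·5^i (idiomatic, same cost).

-- ===== PORT A =====
def pvScoresA : PySem.Dict String Int := PySem.Dict.ofList [("(", 1), ("[", 2), ("{", 3), ("<", 4)]

-- scores[line[c]] is total on Pre_; outside Pre_ Python raises KeyError (getD 0 there, unclaimed)
def score_incomplete (line : List String) : Int :=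
  ((PySem.List.pyRange 0 (PySem.List.len line) 1).reverse).foldl
    (fun total_score c =>
      let score := PySem.Dict.getD pvScoresA (PySem.List.pyGetD line c "") 0
      total_score * 5 + score) 0

-- ===== PORT B =====
def pvScoresB : PySem.Dict String Int := PySem.Dict.ofList [("(", 1), ("[", 2), ("{", 3), ("<", 4)]

def score_incomplete_alt (line : List String) : Int :=
  ((PySem.List.enumerate line).map (fun p => PySem.Dict.getD pvScoresB p.2 0 * 5 ^ p.1.toNat)).sum

-- ===== PRECONDITION & SPEC =====
-- Pre_ excludes lines containing a string other than the four opening brackets: Python A (and B) raise KeyError there.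
def Pre_score_incomplete (line : List String) : Prop :=
  ∀ s ∈ line, s = "(" ∨ s = "[" ∨ s = "{" ∨ s = "<"
instance (line : List String) : Decidable (Pre_score_incomplete line) := by unfold Pre_score_incomplete; infer_instance

def pvWitness_score_incomplete : List String := ["(", "<", "{", "["]

def Spec_score_incomplete (line : List String) (out : Int) : Prop := out = score_incomplete_alt line
instance (line : List String) (out : Int) : Decidable (Spec_score_incomplete line out) := by unfold Spec_score_incomplete; infer_instance

-- ===== CLAIM (what is proved, stated in full; the proofs are below) =====
def Claim_equal_score_incomplete : Prop := ∀ (line : List String), Dom_score_incomplete line → Pre_score_incomplete line → Spec_score_incomplete line (score_incomplete line)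

-- ===== LEMMAS AND PROOFS =====

-- Horner over the reversed index range equals the power-weighted sum (generalised over the accumulator).
theorem pv_horner_eq (g : String → Int) (line : List String) (a : Int) :
    (List.range line.length).reverse.foldl (fun t k => t * 5 + g (line.getD k "")) a
      = a * 5 ^ line.length
        + ((PySem.List.enumerate line).map (fun p => g p.2 * 5 ^ p.1.toNat)).sum := by
  induction line using List.reverseRecOn generalizing a with
  | nil => simp [PySem.List.enumerate_nil]
  | append_singleton ys x ih =>
      have hx : (ys ++ [x]).getD ys.length "" = x := by
        simp [List.getD]
      have hlt : ∀ (acc : Int), ∀ k ∈ (List.range ys.length).reverse,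
          acc * 5 + g ((ys ++ [x]).getD k "") = acc * 5 + g (ys.getD k "") := by
        intro acc k hk
        have hk' : k < ys.length := by
          have := List.mem_reverse.mp hk; exact List.mem_range.mp this
        simp [List.getD, List.getElem?_append_left hk']
      rw [List.length_append, List.length_singleton, List.range_succ, List.reverse_append]
      simp only [List.reverse_singleton, List.singleton_append, List.foldl_cons, hx]
      rw [PySem.List.foldl_congr_mem _ _ _ _ hlt, ih]
      rw [PySem.List.enumerate_append]
      simp only [List.map_append, List.sum_append,
        PySem.List.enumerate_cons, PySem.List.enumerate_nil, List.map_cons, List.map_nil,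
        List.sum_cons, List.sum_nil]
      ring_nf
      simp

theorem pv_ports_eq (line : List String) : score_incomplete line = score_incomplete_alt line := by
  unfold score_incomplete score_incomplete_alt
  rw [PySem.List.len_eq, PySem.List.pyRange_zero_natCast, ← List.map_reverse, List.foldl_map]
  have h := pv_horner_eq (fun s => PySem.Dict.getD pvScoresA s 0) line 0
  simp only [PySem.List.pyGetD_natCast] at *
  rw [h]
  simp [pvScoresA, pvScoresB]

-- ===== VERDICT (by name: the statement is the Claim_ definition above) =====
theorem score_incomplete_spec : Claim_equal_score_incomplete := by
  intro line _ _
  exact pv_ports_eq line
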